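-- pv_equiv track=rewrite | github.com/AnkitShaw-100/Python-Basics | Function/1. Spy_number_using_function.py | spy
-- ===== SOURCE A (Python) =====
-- def spy(n):
--     s = 0
--     m = 1
--     while n > 0 :
--         r = n % 10
--         s += r
--         m *= r
--         n = n//10
--     if s == m :
--         return True
--     else :
--         return False
-- ===== SOURCE B (Python) =====
-- def spy(n):
--     # String-based: iterate over the decimal digits of n directly.
--     if n < 1:
--         return False
--     s = 0
--     m = 1
--     for ch in str(n):
--         d = ord(ch) - 48
--         s += d
--         m *= d
--     return s == m
-- ===== Notes on version B (the rewrite author's own statement) =====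
-- stated objective: idiomatic
-- what changed: Replaces the modulus/floor-division digit-extraction while-loop with a single pass over the characters of str(n) (guarding nonpositive n to False, as A's never-entered loop yields), accumulating digit sum and product.
import Mathlib
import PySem

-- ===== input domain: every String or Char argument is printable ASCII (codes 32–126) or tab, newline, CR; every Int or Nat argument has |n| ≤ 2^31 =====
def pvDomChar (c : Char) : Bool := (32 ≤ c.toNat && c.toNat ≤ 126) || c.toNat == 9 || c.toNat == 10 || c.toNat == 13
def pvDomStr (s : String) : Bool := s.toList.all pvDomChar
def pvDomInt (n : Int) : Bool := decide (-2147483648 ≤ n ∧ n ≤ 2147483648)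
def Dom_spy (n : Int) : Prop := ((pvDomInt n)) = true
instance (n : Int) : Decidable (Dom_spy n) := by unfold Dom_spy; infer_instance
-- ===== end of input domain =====

-- B replaces A's modulus/floor-division digit extraction with a single pass over the
-- decimal string's characters (idiomatic); same cost, no speed claim.

-- ===== PORT A =====
-- the while loop of A: extract a digit with mod, accumulate, floor-divide
def spyLoop (n s m : Int) : Int × Int :=
  if h : n > 0 then
    spyLoop (PySem.Int.floordiv n 10) (s + PySem.Int.mod n 10) (m * PySem.Int.mod n 10)
  else (s, m)
termination_by n.toNat
decreasing_by
  have h1 : PySem.Int.floordiv n 10 = n / 10 := Int.fdiv_eq_ediv_of_nonneg n (by norm_num)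
  omega

def spy (n : Int) : Bool :=
  let sm := spyLoop n 0 1
  if sm.1 = sm.2 then true else false

-- ===== PORT B =====
def spy_alt (n : Int) : Bool :=
  if n < 1 then false
  else
    let sm := (PySem.Int.toChars n).foldl
      (fun (sm : Int × Int) ch =>
        (sm.1 + ((ch.toNat : Int) - 48), sm.2 * ((ch.toNat : Int) - 48))) (0, 1)
    decide (sm.1 = sm.2)

-- ===== PRECONDITION & SPEC =====
def Spec_spy (n : Int) (out : Bool) : Prop := out = spy_alt n
instance (n : Int) (out : Bool) : Decidable (Spec_spy n out) := by unfold Spec_spy; infer_instance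

-- ===== CLAIM (what is proved, stated in full; the proofs are below) =====
def Claim_equal_spy : Prop := ∀ (n : Int), Dom_spy n → Spec_spy n (spy n)

-- ===== LEMMAS AND PROOFS =====

-- digit sum / digit product of a natural number (proof-side characterisation)
def dsum (k : Nat) : Int :=
  if k = 0 then 0 else ((k % 10 : Nat) : Int) + dsum (k / 10)
decreasing_by exact Nat.div_lt_self (Nat.pos_of_ne_zero (by assumption)) (by norm_num)

def dprod (k : Nat) : Int :=
  if k = 0 then 1 else dprod (k / 10) * ((k % 10 : Nat) : Int)
decreasing_by exact Nat.div_lt_self (Nat.pos_of_ne_zero (by assumption)) (by norm_num)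

theorem dsum_ne (k : Nat) (hk : k ≠ 0) : dsum k = ((k % 10 : Nat) : Int) + dsum (k / 10) := by
  conv_lhs => rw [dsum]
  rw [if_neg hk]

theorem dprod_ne (k : Nat) (hk : k ≠ 0) : dprod k = dprod (k / 10) * ((k % 10 : Nat) : Int) := by
  conv_lhs => rw [dprod]
  rw [if_neg hk]

theorem digitChar_toNat (d : Nat) (hd : d < 10) :
    ((Nat.digitChar d).toNat : Int) - 48 = (d : Int) := by
  interval_cases d <;> decide

theorem spyLoop_eq (k : Nat) : ∀ s m : Int, spyLoop (k : Int) s m = (s + dsum k, m * dprod k) := by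
  induction k using Nat.strong_induction_on with
  | _ k ih =>
    intro s m
    by_cases hk : k = 0
    · subst hk
      rw [spyLoop, dsum, dprod]
      simp
    · have hkpos : (0 : Int) < (k : Int) := by exact_mod_cast Nat.pos_of_ne_zero hk
      have hfd : PySem.Int.floordiv (k : Int) 10 = ((k / 10 : Nat) : Int) := by
        rw [PySem.Int.floordiv, Int.fdiv_eq_ediv_of_nonneg _ (by norm_num)]
        omega
      have hmd : PySem.Int.mod (k : Int) 10 = ((k % 10 : Nat) : Int) := by
        rw [PySem.Int.mod, Int.fmod_eq_emod]
        omega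
      rw [spyLoop, dif_pos hkpos, dsum_ne k hk, dprod_ne k hk, hfd, hmd,
        ih (k / 10) (Nat.div_lt_self (Nat.pos_of_ne_zero hk) (by norm_num))]
      simp only [Prod.mk.injEq]
      constructor <;> ring

theorem fold_toDigits (k : Nat) (hk : 0 < k) : ∀ s m : Int,
    (Nat.toDigits 10 k).foldl
      (fun (sm : Int × Int) ch =>
        (sm.1 + ((ch.toNat : Int) - 48), sm.2 * ((ch.toNat : Int) - 48))) (s, m)
      = (s + dsum k, m * dprod k) := by
  induction k using Nat.strong_induction_on with
  | _ k ih =>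
    intro s m
    by_cases hsm : k < 10
    · rw [Nat.toDigits_of_lt_base hsm]
      have hk10 : k % 10 = k := Nat.mod_eq_of_lt hsm
      have hdiv : k / 10 = 0 := Nat.div_eq_of_lt hsm
      have hk0 : k ≠ 0 := Nat.pos_iff_ne_zero.mp hk
      rw [List.foldl_cons, List.foldl_nil, digitChar_toNat k hsm,
        dsum_ne k hk0, dprod_ne k hk0, Nat.mod_eq_of_lt hsm, Nat.div_eq_of_lt hsm]
      rw [dsum, dprod]
      simp
    · have hle : 10 ≤ k := le_of_not_gt hsm
      rw [Nat.toDigits_of_base_le (by norm_num) hle, List.foldl_append,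
        ih (k / 10) (Nat.div_lt_self hk (by norm_num)) (Nat.div_pos hle (by norm_num)) s m,
        List.foldl_cons, List.foldl_nil, digitChar_toNat (k % 10) (Nat.mod_lt _ (by norm_num)),
        dsum_ne k (Nat.pos_iff_ne_zero.mp hk), dprod_ne k (Nat.pos_iff_ne_zero.mp hk)]
      simp only [Prod.mk.injEq]
      constructor <;> ring

-- ===== VERDICT (by name: the statement is the Claim_ definition above) =====
theorem spy_spec : Claim_equal_spy := by
  intro n _
  unfold Spec_spy spy spy_alt
  by_cases hn : n < 1
  · rw [if_pos hn, spyLoop, dif_neg (by omega)]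
    simp
  · have hpos : 0 < n := by omega
    have hcast : ((n.toNat : Nat) : Int) = n := Int.toNat_of_nonneg (le_of_lt hpos)
    have hch : PySem.Int.toChars n = Nat.toDigits 10 n.toNat := by
      rw [PySem.Int.toChars, if_neg (by omega)]
    have hloop : spyLoop n 0 1 = (0 + dsum n.toNat, 1 * dprod n.toNat) := by
      have h := spyLoop_eq n.toNat 0 1
      rw [hcast] at h
      exact h
    rw [if_neg hn, hch, fold_toDigits n.toNat (by omega) 0 1, hloop]
    simp
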